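-- pv_equiv track=rewrite | github.com/elenadighei/Assignment-1 | 3Par.py | Three_Par
-- ===== SOURCE A (Python) =====
-- def Three_Par(a):
--    pivot = a[0]
--    smaller =[]
--    equal = []
--    larger = []
--
--    for i in range(1, len(a)):
--       if a[i] < pivot:
--          smaller.append(a[i])
--       elif a[i] == pivot:
--          equal.append(a[i])
--       else:
--          larger.append(a[i])
--
--    return smaller + equal + [pivot] + larger
-- ===== SOURCE B (Python) =====
-- def Three_Par(a):
--     pivot = a[0]
--     rest = a[1:]
--     smaller = [x for x in rest if x < pivot]
--     equal = [x for x in rest if x == pivot]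
--     larger = [x for x in rest if x > pivot]
--     return smaller + equal + [pivot] + larger
-- ===== Notes on version B (the rewrite author's own statement) =====
-- stated objective: simpler
-- what changed: Replaces A's single index-driven classifying loop with three accumulators by three independent filtering passes over a[1:] concatenated around the pivot.
import Mathlib
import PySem

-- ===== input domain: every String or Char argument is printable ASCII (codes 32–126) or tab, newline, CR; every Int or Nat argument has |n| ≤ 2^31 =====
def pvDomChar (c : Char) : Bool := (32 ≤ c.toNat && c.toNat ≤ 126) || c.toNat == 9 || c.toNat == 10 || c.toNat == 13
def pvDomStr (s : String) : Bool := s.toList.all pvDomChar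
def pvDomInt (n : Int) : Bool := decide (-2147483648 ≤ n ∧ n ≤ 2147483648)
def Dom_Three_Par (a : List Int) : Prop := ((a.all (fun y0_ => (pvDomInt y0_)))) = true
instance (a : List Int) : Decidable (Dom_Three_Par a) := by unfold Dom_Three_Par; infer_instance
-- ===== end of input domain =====

-- B replaces A's single classifying loop by three filtering passes; objective: simpler. Equal return values on nonempty lists; both raise IndexError on [].
-- ===== PORT A =====
def Three_Par (a : List Int) : List Int :=
  let pivot := (PySem.List.pyGet? a 0).getD 0   -- a[0]; IndexError on [] is excluded by Pre_
  let r := (PySem.List.pyRange 1 a.length 1).foldl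
    (fun (acc : List Int × List Int × List Int) i =>
      let x := PySem.List.pyGetD a i 0          -- a[i], index always in range inside this loop
      if x < pivot then (acc.1 ++ [x], acc.2.1, acc.2.2)
      else if x = pivot then (acc.1, acc.2.1 ++ [x], acc.2.2)
      else (acc.1, acc.2.1, acc.2.2 ++ [x]))
    ([], [], [])
  r.1 ++ r.2.1 ++ [pivot] ++ r.2.2

-- ===== PORT B =====
def Three_Par_alt (a : List Int) : List Int :=
  match a with
  | [] => []                                   -- unreachable under Pre_ (Python raises IndexError)
  | pivot :: rest =>
    rest.filter (· < pivot) ++ rest.filter (· = pivot) ++ [pivot] ++ rest.filter (pivot < ·)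

-- ===== PRECONDITION & SPEC =====
-- Pre_ excludes only the empty list, on which Python's a[0] raises IndexError.
def Pre_Three_Par (a : List Int) : Prop := a ≠ []
instance (a : List Int) : Decidable (Pre_Three_Par a) := by unfold Pre_Three_Par; infer_instance
def pvWitness_Three_Par : List Int := ([3, 1, 3, 7])

def Spec_Three_Par (a : List Int) (out : List Int) : Prop := out = Three_Par_alt a
instance (a : List Int) (out : List Int) : Decidable (Spec_Three_Par a out) := by unfold Spec_Three_Par; infer_instance

-- ===== CLAIM (what is proved, stated in full; the proofs are below) =====
def Claim_equal_Three_Par : Prop := ∀ (a : List Int), Dom_Three_Par a → Pre_Three_Par a → Spec_Three_Par a (Three_Par a)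

-- ===== LEMMAS AND PROOFS =====

theorem tri_foldl (t : List Int) (p : Int) (s e l : List Int) :
    t.foldl (fun (acc : List Int × List Int × List Int) x =>
        if x < p then (acc.1 ++ [x], acc.2.1, acc.2.2)
        else if x = p then (acc.1, acc.2.1 ++ [x], acc.2.2)
        else (acc.1, acc.2.1, acc.2.2 ++ [x])) (s, e, l)
      = (s ++ t.filter (· < p), e ++ t.filter (· = p), l ++ t.filter (p < ·)) := by
  induction t generalizing s e l with
  | nil => simp
  | cons x t ih =>
    simp only [List.foldl_cons, List.filter_cons]
    by_cases h1 : x < p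
    · simp [h1, ih]
      omega
    · by_cases h2 : x = p
      · simp [h2, ih]
      · simp [h1, h2, (by omega : p < x), ih]

-- ===== VERDICT (by name: the statement is the Claim_ definition above) =====
theorem Three_Par_spec : Claim_equal_Three_Par := by
  intro a _ hpre
  unfold Spec_Three_Par Three_Par Three_Par_alt
  match a with
  | [] => exact absurd rfl hpre
  | p :: t =>
    have hp : (PySem.List.pyGet? (p :: t) 0).getD 0 = p := by
      simp [PySem.List.pyGet?, PySem.List.pyIdx?]
    simp only [hp]
    rw [PySem.List.foldl_pyRange_pyGetD' (p :: t) 0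
      (fun (acc : List Int × List Int × List Int) x =>
        if x < p then (acc.1 ++ [x], acc.2.1, acc.2.2)
        else if x = p then (acc.1, acc.2.1 ++ [x], acc.2.2)
        else (acc.1, acc.2.1, acc.2.2 ++ [x])) ([], [], []) (by omega : (0:Int) ≤ 1)]
    simp [tri_foldl]
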